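-- pv_equiv track=rewrite | github.com/edangelux/Proyectos | aprendiendo-python/Python-total/dia5/ejercicio code14.py | reducir_lista
-- ===== SOURCE A (Python) =====
-- def reducir_lista(lista):
--     lista_sin_duplicado = []
--     for numero in lista:
--         if numero not in lista_sin_duplicado:
--             lista_sin_duplicado.append(numero)
--     if lista_sin_duplicado:
--         lista_sin_duplicado.remove(max(lista_sin_duplicado))
--     return lista_sin_duplicado
-- ===== SOURCE B (Python) =====
-- def reducir_lista(lista):
--     if not lista:
--         return []
--     m = max(lista)
--     resultado = []
--     for numero in lista:
--         if numero != m and numero not in resultado: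
--             resultado.append(numero)
--     return resultado
-- ===== Notes on version B (the rewrite author's own statement) =====
-- stated objective: alternative
-- what changed: Instead of dedup-everything-then-list.remove(max), B computes the max of the original list up front and builds the order-preserving dedup in one pass that skips the max as it goes.
import Mathlib
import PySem

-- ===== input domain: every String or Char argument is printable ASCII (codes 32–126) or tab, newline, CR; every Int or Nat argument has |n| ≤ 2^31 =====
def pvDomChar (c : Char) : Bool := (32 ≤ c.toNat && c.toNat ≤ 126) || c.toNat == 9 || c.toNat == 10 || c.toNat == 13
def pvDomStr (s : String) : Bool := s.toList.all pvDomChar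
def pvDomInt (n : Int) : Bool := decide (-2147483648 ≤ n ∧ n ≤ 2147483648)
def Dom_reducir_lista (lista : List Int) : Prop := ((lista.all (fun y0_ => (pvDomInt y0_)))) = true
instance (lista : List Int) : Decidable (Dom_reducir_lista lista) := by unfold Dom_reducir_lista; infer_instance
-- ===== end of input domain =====

-- B replaces A's dedup-then-list.remove(max) with computing max first and
-- deduping in one pass that skips the max; same cost, different decomposition.

-- ===== PORT A =====
-- the 'for numero in lista' dedup-accumulation loop
def pvDedupStep (acc : List Int) (numero : Int) : List Int :=
  if numero ∈ acc then acc else acc ++ [numero]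

def reducir_lista (lista : List Int) : List Int :=
  let lista_sin_duplicado := lista.foldl pvDedupStep []
  if lista_sin_duplicado = [] then lista_sin_duplicado
  else
    match PySem.List.max? lista_sin_duplicado (fun y => y) with
    | none => lista_sin_duplicado            -- unreachable: list is nonempty
    | some m =>
      match PySem.List.remove? lista_sin_duplicado m with
      | none => lista_sin_duplicado          -- unreachable: max is a member
      | some r => r

-- ===== PORT B =====
def reducir_lista_alt (lista : List Int) : List Int :=
  if lista = [] then []
  else
    match PySem.List.max? lista (fun y => y) with
    | none => []                             -- unreachable: list is nonempty
    | some m =>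
      lista.foldl (fun resultado numero =>
        if numero ≠ m ∧ numero ∉ resultado then resultado ++ [numero]
        else resultado) []

-- ===== PRECONDITION & SPEC =====
def Spec_reducir_lista (lista : List Int) (out : List Int) : Prop := out = reducir_lista_alt lista
instance (lista : List Int) (out : List Int) : Decidable (Spec_reducir_lista lista out) := by unfold Spec_reducir_lista; infer_instance

-- ===== CLAIM (what is proved, stated in full; the proofs are below) =====
def Claim_equal_reducir_lista : Prop := ∀ (lista : List Int), Dom_reducir_lista lista → Spec_reducir_lista lista (reducir_lista lista)

-- ===== LEMMAS AND PROOFS =====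

theorem mem_dedup_foldl (l : List Int) : ∀ (acc : List Int) (x : Int),
    x ∈ l.foldl pvDedupStep acc ↔ x ∈ acc ∨ x ∈ l := by
  induction l with
  | nil => simp
  | cons n t ih =>
    intro acc x
    simp only [List.foldl_cons, ih, pvDedupStep]
    split_ifs with h
    · constructor
      · rintro (h1 | h2)
        · exact Or.inl h1
        · exact Or.inr (List.mem_cons_of_mem _ h2)
      · rintro (h1 | h2)
        · exact Or.inl h1
        · rcases List.mem_cons.mp h2 with rfl | h3
          · exact Or.inl h
          · exact Or.inr h3
    · simp [List.mem_append, List.mem_cons]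
      tauto
  
theorem pvDedupStep_mem {acc : List Int} {n : Int} (h : n ∈ acc) :
    pvDedupStep acc n = acc := by simp [pvDedupStep, h]

theorem pvDedupStep_not_mem {acc : List Int} {n : Int} (h : n ∉ acc) :
    pvDedupStep acc n = acc ++ [n] := by simp [pvDedupStep, h]

theorem nodup_dedup_foldl (l : List Int) : ∀ (acc : List Int), acc.Nodup →
    (l.foldl pvDedupStep acc).Nodup := by
  induction l with
  | nil => intro acc h; simpa using h
  | cons n t ih =>
    intro acc h
    simp only [List.foldl_cons]
    by_cases hn : n ∈ acc
    · rw [pvDedupStep_mem hn]; exact ih acc h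
    · rw [pvDedupStep_not_mem hn]
      refine ih _ ?_
      rw [List.nodup_append]
      refine ⟨h, List.nodup_singleton n, ?_⟩
      intro a ha b hb
      rw [List.mem_singleton] at hb
      subst hb
      exact fun he => hn (he ▸ ha)

theorem dedup_foldl_filter (p : Int → Bool) (l : List Int) : ∀ (acc : List Int),
    (l.filter p).foldl pvDedupStep (acc.filter p) = (l.foldl pvDedupStep acc).filter p := by
  induction l with
  | nil => simp
  | cons n t ih =>
    intro acc
    by_cases hp : p n = true
    · rw [show (n :: t).filter p = n :: t.filter p from by simp [hp],
          List.foldl_cons, List.foldl_cons]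
      by_cases hn : n ∈ acc
      · rw [pvDedupStep_mem (List.mem_filter.mpr ⟨hn, hp⟩), pvDedupStep_mem hn]
        exact ih acc
      · rw [pvDedupStep_not_mem (fun hc => hn (List.mem_filter.mp hc).1),
            pvDedupStep_not_mem hn,
            show List.filter p acc ++ [n] = (acc ++ [n]).filter p from by
              simp [List.filter_append, hp]]
        exact ih _
    · rw [show (n :: t).filter p = t.filter p from by
            simp [hp], List.foldl_cons]
      by_cases hn : n ∈ acc
      · rw [pvDedupStep_mem hn]; exact ih acc
      · rw [pvDedupStep_not_mem hn,
            show List.filter p acc = (acc ++ [n]).filter p from by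
              simp [List.filter_append, hp]]
        exact ih _

theorem b_fold_eq_dedup_filter (m : Int) (l : List Int) : ∀ (acc : List Int),
    l.foldl (fun resultado numero =>
        if numero ≠ m ∧ numero ∉ resultado then resultado ++ [numero]
        else resultado) acc
      = (l.filter (fun n => n ≠ m)).foldl pvDedupStep acc := by
  induction l with
  | nil => simp
  | cons n t ih =>
    intro acc
    rw [List.foldl_cons]
    by_cases hn : n = m
    · rw [if_neg (by simp [hn]),
          show (n :: t).filter (fun x => decide (x ≠ m)) = t.filter (fun x => decide (x ≠ m))
            from by simp [hn]]
      exact ih acc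
    · rw [show (n :: t).filter (fun x => decide (x ≠ m))
            = n :: t.filter (fun x => decide (x ≠ m)) from by simp [hn],
          List.foldl_cons]
      by_cases hm : n ∈ acc
      · rw [if_neg (by tauto), pvDedupStep_mem hm]; exact ih acc
      · rw [if_pos ⟨hn, hm⟩, pvDedupStep_not_mem hm]; exact ih _

theorem dedup_foldl_ne_nil (a : Int) (t : List Int) :
    (a :: t).foldl pvDedupStep [] ≠ [] := by
  intro h
  have : a ∈ (a :: t).foldl pvDedupStep ([] : List Int) := by
    rw [mem_dedup_foldl]; simp
  rw [h] at this; simp at this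

-- max over the deduped list equals max over the original list
theorem max_dedup_eq (l : List Int) (hl : l ≠ []) :
    PySem.List.max? (l.foldl pvDedupStep []) (fun y => y)
      = PySem.List.max? l (fun y => y) := by
  have hd : l.foldl pvDedupStep [] ≠ [] := by
    cases l with
    | nil => exact absurd rfl hl
    | cons a t => exact dedup_foldl_ne_nil a t
  rcases h1 : PySem.List.max? (l.foldl pvDedupStep []) (fun y => y) with _ | m1
  · exact absurd ((PySem.List.max?_eq_none_iff _ _).mp h1) hd
  rcases h2 : PySem.List.max? l (fun y => y) with _ | m2
  · exact absurd ((PySem.List.max?_eq_none_iff _ _).mp h2) hl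
  have hm1' : m1 ∈ l :=
    ((mem_dedup_foldl l [] m1).mp (PySem.List.max?_mem h1)).resolve_left (by simp)
  have hm2' : m2 ∈ l.foldl pvDedupStep [] :=
    (mem_dedup_foldl l [] m2).mpr (Or.inr (PySem.List.max?_mem h2))
  have hle1 := PySem.List.max?_isMax h1 m2 hm2'
  have hle2 := PySem.List.max?_isMax h2 m1 hm1'
  simp only [Option.some_inj]
  omega

-- ===== VERDICT (by name: the statement is the Claim_ definition above) =====
theorem reducir_lista_spec : Claim_equal_reducir_lista := by
  intro lista _
  unfold Spec_reducir_lista reducir_lista reducir_lista_alt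
  by_cases hl : lista = []
  · subst hl; simp
  · have hd : lista.foldl pvDedupStep [] ≠ [] := by
      cases lista with
      | nil => exact absurd rfl hl
      | cons a t => exact dedup_foldl_ne_nil a t
    simp only [hl, hd, if_false]
    rcases hm : PySem.List.max? lista (fun y => y) with _ | m
    · exact absurd ((PySem.List.max?_eq_none_iff _ _).mp hm) hl
    rw [max_dedup_eq lista hl, hm]
    dsimp only
    have hmem : m ∈ lista.foldl pvDedupStep [] :=
      (mem_dedup_foldl lista [] m).mpr (Or.inr (PySem.List.max?_mem hm))
    rw [PySem.List.remove?_eq_some_erase _ m hmem]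
    have hnd : (lista.foldl pvDedupStep []).Nodup := nodup_dedup_foldl lista [] (by simp)
    rw [List.Nodup.erase_eq_filter hnd m]
    rw [b_fold_eq_dedup_filter]
    have h := dedup_foldl_filter (fun n => n != m) lista []
    simp only [List.filter_nil] at h
    rw [show (fun n => decide (n ≠ m)) = (fun n => n != m) from by funext n; rw [bne, Bool.beq_eq_decide_eq]; simp [decide_not]]
    rw [h]
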